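-- pv_equiv track=rewrite | github.com/AdanSul/NaturalLanguageProcessing | Cleaning and Processing the Corpus/processing_knesset_corpus.py | break_text_into_phrases
-- ===== SOURCE A (Python) =====
-- def break_text_into_phrases(input_text):
--     buffer = ''
--     separators = {'.', '!', '?'}
--     phrases = []
--
--     for i, symbol in enumerate(input_text):
--         if symbol in separators:
--             # Check if the separator is part of a number or date
--             if i > 0 and i < len(input_text) - 1:
--                 prev_char = input_text[i - 1]
--                 next_char = input_text[i + 1]
--
--                 if prev_char.isdigit() and next_char.isdigit():
--                     buffer += symbol  # Treat as part of a number/date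
--                     continue
--
--             # Check if the period is part of a numbered list
--             if i > 0 and input_text[i - 1].isdigit() and input_text[i - 2] == ' ' and (i < len(input_text) - 1 and input_text[i + 1] == ' '):
--                 buffer += symbol  # Treat as part of the enumeration
--                 continue
--
--             # Add the sentence to the list
--             buffer += symbol
--             if buffer.strip():
--                 phrases.append(buffer.strip())
--             buffer = ''
--         else:
--             buffer += symbol
--
--     if buffer.strip():
--         phrases.append(buffer.strip())
--
--     return phrases
-- ===== SOURCE B (Python) =====
-- def _protected(t, i):
--     # separator glued into a number/date: digit on both sides
--     if 0 < i < len(t) - 1 and t[i - 1].isdigit() and t[i + 1].isdigit():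
--         return True
--     # enumeration like " 3. " (keeps Python's negative lookbehind t[i-2] at i == 1)
--     if i > 0 and t[i - 1].isdigit() and t[i - 2] == ' ' and i < len(t) - 1 and t[i + 1] == ' ':
--         return True
--     return False
--
-- def break_text_into_phrases(input_text):
--     breaks = [i for i in range(len(input_text))
--               if input_text[i] in '.!?' and not _protected(input_text, i)]
--     phrases = []
--     start = 0
--     for b in breaks:
--         seg = input_text[start:b + 1].strip()
--         if seg:
--             phrases.append(seg)
--         start = b + 1
--     tail = input_text[start:].strip()
--     if tail:
--         phrases.append(tail)
--     return phrases
-- ===== Notes on version B (the rewrite author's own statement) =====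
-- stated objective: alternative
-- what changed: B replaces A's single pass with a running buffer by a two-pass decomposition: first collect all genuine split indices with a comprehension, then slice the text between consecutive split points and strip each segment; slicing avoids A's per-character buffer concatenation.
import Mathlib
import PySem

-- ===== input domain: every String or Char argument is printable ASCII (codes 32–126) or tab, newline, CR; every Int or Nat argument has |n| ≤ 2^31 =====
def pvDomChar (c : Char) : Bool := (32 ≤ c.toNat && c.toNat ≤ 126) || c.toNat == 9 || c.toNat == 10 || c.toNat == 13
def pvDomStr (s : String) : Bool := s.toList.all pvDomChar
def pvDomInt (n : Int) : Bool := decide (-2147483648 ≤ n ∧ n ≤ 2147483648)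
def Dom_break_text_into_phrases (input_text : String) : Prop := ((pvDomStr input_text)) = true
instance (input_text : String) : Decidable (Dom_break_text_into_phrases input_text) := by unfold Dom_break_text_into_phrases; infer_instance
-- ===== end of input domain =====

-- B replaces A's running-buffer accumulation by a two-pass decomposition: first collect the
-- split indices, then slice the text between them (objective: alternative decomposition).

-- ===== PORT A =====
def pvSeps : PySem.Set Char := PySem.Set.ofList ['.', '!', '?']

-- loop body of A's 'for i, symbol in enumerate(input_text)', state = (buffer, phrases)
def pvAStep (t : List Char) (st : List Char × List (List Char)) (p : Int × Char) :
    List Char × List (List Char) :=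
  let buffer := st.1
  let phrases := st.2
  let i := p.1
  let symbol := p.2
  if PySem.Set.contains pvSeps symbol then
    if decide (0 < i) && decide (i < (t.length : Int) - 1)
        && PySem.Chars.isdigit (PySem.List.pyGetD t (i - 1) ' ')
        && PySem.Chars.isdigit (PySem.List.pyGetD t (i + 1) ' ') then
      (buffer ++ [symbol], phrases)
    else if decide (0 < i) && PySem.Chars.isdigit (PySem.List.pyGetD t (i - 1) ' ')
        && (PySem.List.pyGetD t (i - 2) ' ' == ' ')
        && decide (i < (t.length : Int) - 1)
        && (PySem.List.pyGetD t (i + 1) ' ' == ' ') then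
      (buffer ++ [symbol], phrases)
    else
      let buffer := buffer ++ [symbol]
      if PySem.Chars.strip buffer ≠ [] then ([], phrases ++ [PySem.Chars.strip buffer])
      else ([], phrases)
  else (buffer ++ [symbol], phrases)

def break_text_into_phrases (input_text : String) : List String :=
  let t := input_text.toList
  let res := (PySem.List.enumerate t).foldl (pvAStep t) ([], [])
  let phrases :=
    if PySem.Chars.strip res.1 ≠ [] then res.2 ++ [PySem.Chars.strip res.1] else res.2
  phrases.map String.ofList

-- ===== PORT B =====
def pvProtected (t : List Char) (i : Int) : Bool :=
  (decide (0 < i) && decide (i < (t.length : Int) - 1)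
      && PySem.Chars.isdigit (PySem.List.pyGetD t (i - 1) ' ')
      && PySem.Chars.isdigit (PySem.List.pyGetD t (i + 1) ' '))
  || (decide (0 < i) && PySem.Chars.isdigit (PySem.List.pyGetD t (i - 1) ' ')
      && (PySem.List.pyGetD t (i - 2) ' ' == ' ')
      && decide (i < (t.length : Int) - 1)
      && (PySem.List.pyGetD t (i + 1) ' ' == ' '))

def pvSplit (t : List Char) (i : Int) : Bool :=
  ['.', '!', '?'].contains (PySem.List.pyGetD t i ' ') && !(pvProtected t i)

-- loop body of B's 'for b in breaks', state = (start, phrases)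
def pvBStep (t : List Char) (st : Int × List (List Char)) (b : Int) :
    Int × List (List Char) :=
  let seg := PySem.Chars.strip (PySem.List.slice t (some st.1) (some (b + 1)))
  (b + 1, if seg ≠ [] then st.2 ++ [seg] else st.2)

def break_text_into_phrases_alt (input_text : String) : List String :=
  let t := input_text.toList
  let breaks := (PySem.List.pyRange 0 (t.length : Int) 1).filter (pvSplit t)
  let res := breaks.foldl (pvBStep t) ((0 : Int), [])
  let tail := PySem.Chars.strip (PySem.List.slice t (some res.1) none)
  let phrases := if tail ≠ [] then res.2 ++ [tail] else res.2
  phrases.map String.ofList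

-- ===== PRECONDITION & SPEC =====
def Spec_break_text_into_phrases (input_text : String) (out : List String) : Prop := out = break_text_into_phrases_alt input_text
instance (input_text : String) (out : List String) : Decidable (Spec_break_text_into_phrases input_text out) := by unfold Spec_break_text_into_phrases; infer_instance

-- ===== CLAIM (what is proved, stated in full; the proofs are below) =====
def Claim_equal_break_text_into_phrases : Prop := ∀ (input_text : String), Dom_break_text_into_phrases input_text → Spec_break_text_into_phrases input_text (break_text_into_phrases input_text)

-- ===== LEMMAS AND PROOFS =====

-- A's final flush of the buffer
def pvFinishA (st : List Char × List (List Char)) : List (List Char) :=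
  if PySem.Chars.strip st.1 ≠ [] then st.2 ++ [PySem.Chars.strip st.1] else st.2

-- B's tail handling
def pvFinishB (t : List Char) (st : Int × List (List Char)) : List (List Char) :=
  let tail := PySem.Chars.strip (PySem.List.slice t (some st.1) none)
  if tail ≠ [] then st.2 ++ [tail] else st.2

theorem pvMain (t : List Char) : ∀ (k n start : Nat), t.length - n = k → n ≤ t.length →
    start ≤ n → ∀ (phr : List (List Char)),
    pvFinishA ((PySem.List.enumerate (t.drop n) (n : Int)).foldl (pvAStep t)
      ((t.drop start).take (n - start), phr))
    = pvFinishB t (((PySem.List.pyRange (n : Int) (t.length : Int) 1).filter (pvSplit t)).foldl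
        (pvBStep t) ((start : Int), phr)) := by
  intro k
  induction k with
  | zero =>
    intro n start hk hn hs phr
    have hlen : n = t.length := by omega
    subst hlen
    rw [List.drop_length, PySem.List.pyRange_one_eq_nil (le_refl _)]
    simp only [PySem.List.enumerate_nil, List.filter_nil, List.foldl_nil]
    have h1 : (t.drop start).take (t.length - start) = t.drop start := by
      apply List.take_of_length_le; simp
    rw [h1, pvFinishA, pvFinishB]
    rw [PySem.List.slice_from_natCast]
  | succ k ih =>
    intro n start hk hn hs phr
    have hlt : n < t.length := by omega
    have hdrop : t.drop n = t[n] :: t.drop (n + 1) := List.drop_eq_getElem_cons hlt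
    have hbuf : (t.drop start).take (n - start) ++ [t[n]] = (t.drop start).take (n + 1 - start) := by
      have hidx : (t.drop start)[n - start]? = some t[n] := by
        rw [List.getElem?_drop]
        have : start + (n - start) = n := by omega
        rw [this, List.getElem?_eq_getElem hlt]
      have : n + 1 - start = (n - start) + 1 := by omega
      rw [this, List.take_add_one, hidx]
      rfl
    rw [hdrop, PySem.List.enumerate_cons, List.foldl_cons,
        PySem.List.pyRange_one_cons (by exact_mod_cast hlt)]
    have hcast : (n : Int) + 1 = ((n + 1 : Nat) : Int) := by push_cast; ring
    -- the character at position n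
    have hget : PySem.List.pyGetD t (n : Int) ' ' = t[n] := by
      rw [PySem.List.pyGetD_natCast, List.getD_eq_getElem?_getD, List.getElem?_eq_getElem hlt]
      rfl
    by_cases hsplit : pvSplit t (n : Int) = true
    · -- split point: A flushes the buffer, B records index n
      rw [List.filter_cons_of_pos hsplit, List.foldl_cons]
      have hsep : PySem.Set.contains pvSeps t[n] = true := by
        have := hsplit
        unfold pvSplit at this
        rw [hget] at this
        simp only [Bool.and_eq_true] at this
        simpa [pvSeps, PySem.Set.contains, PySem.Set.ofList] using this.1
      have hprot : pvProtected t (n : Int) = false := by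
        have := hsplit
        unfold pvSplit at this
        simp only [Bool.and_eq_true, Bool.not_eq_true'] at this
        exact this.2
      unfold pvProtected at hprot
      simp only [Bool.or_eq_false_iff] at hprot
      rw [pvAStep]
      simp only [hsep, if_true, hprot.1, hprot.2, Bool.false_eq_true, if_false]
      rw [pvBStep]
      simp only
      rw [hcast, PySem.List.slice_natCast, hbuf]
      set seg := PySem.Chars.strip ((t.drop start).take (n + 1 - start)) with hseg
      by_cases hne : seg ≠ []
      · rw [if_pos hne, if_pos hne]
        have := ih (n + 1) (n + 1) (by omega) (by omega) (by omega) (phr ++ [seg])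
        simpa only [Nat.sub_self, List.take_zero, hcast] using this
      · rw [if_neg hne, if_neg hne]
        have := ih (n + 1) (n + 1) (by omega) (by omega) (by omega) phr
        simpa only [Nat.sub_self, List.take_zero, hcast] using this
    · -- no split: A extends the buffer, B skips index n
      rw [List.filter_cons_of_neg (by simpa using hsplit)]
      have hstep : pvAStep t ((t.drop start).take (n - start), phr) ((n : Int), t[n])
          = ((t.drop start).take (n + 1 - start), phr) := by
        unfold pvSplit at hsplit
        rw [hget] at hsplit
        rw [pvAStep]
        simp only
        by_cases hsep : PySem.Set.contains pvSeps t[n] = true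
        · have hsep' : ['.', '!', '?'].contains t[n] = true := by
            simpa [pvSeps, PySem.Set.contains, PySem.Set.ofList] using hsep
          have hprot : pvProtected t (n : Int) = true := by
            by_contra h
            apply hsplit
            simp only [Bool.and_eq_true, Bool.not_eq_true']
            exact ⟨hsep', by simpa using h⟩
          unfold pvProtected at hprot
          simp only [Bool.or_eq_true] at hprot
          rcases hprot with h1 | h2
          · simp only [hsep, if_true, h1, if_true, hbuf]
          · rw [if_pos hsep]
            by_cases h1 : (decide (0 < (n:Int)) && decide ((n:Int) < (t.length : Int) - 1)
                && PySem.Chars.isdigit (PySem.List.pyGetD t ((n:Int) - 1) ' ')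
                && PySem.Chars.isdigit (PySem.List.pyGetD t ((n:Int) + 1) ' ')) = true
            · simp only [h1, if_true, hbuf]
            · simp only [h1, Bool.false_eq_true, if_false, h2, if_true, hbuf]
        · simp only [hsep, Bool.false_eq_true, if_false, hbuf]
      rw [hstep, hcast]
      exact ih (n + 1) start (by omega) (by omega) (by omega) phr

-- ===== VERDICT (by name: the statement is the Claim_ definition above) =====
theorem break_text_into_phrases_spec : Claim_equal_break_text_into_phrases := by
  intro input_text _
  have h := pvMain input_text.toList (input_text.toList.length) 0 0 rfl (Nat.zero_le _)
    (le_refl _) []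
  simp only [List.drop_zero, Nat.cast_zero, pvFinishA, pvFinishB] at h
  unfold Spec_break_text_into_phrases
  simp only [break_text_into_phrases, break_text_into_phrases_alt]
  exact congrArg (List.map String.ofList) h
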